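-- pv_equiv track=rewrite | github.com/Arwa-Fawzy/Cat-Emotional-Analysis | Cat_Labels.py | eye_behavior
-- ===== SOURCE A (Python) =====
-- def eye_behavior(list_of_eyes):
--     eye_behavior_dict = {0: 0
--         , 'Friendly': 0
--         , 'Relaxed': 0
--         , 'aggressive': 0}
--     # check what is the most repeated case in the tail indications for each second
--     for area in list_of_eyes:
--         if area == 'Friendly':
--             eye_behavior_dict['Friendly'] += 1
--         elif area == 'Relaxed':
--             eye_behavior_dict['Relaxed'] += 1
--         elif area == 'aggressive':
--             eye_behavior_dict['aggressive'] += 1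
--
--     sorted_appearance_behavior = sorted(eye_behavior_dict.items(), key=lambda x: x[1])
--     most_appearance_behavior = sorted_appearance_behavior[-1][0]
--     most_appearance_behavior_value = sorted_appearance_behavior[-1][1]
--     total_values = sum(eye_behavior_dict.values())
--     # getting the most appearance indication, its time to be shown and the total time of other indicators to know the ratio of the most apparent indication with other indications
--     return most_appearance_behavior, most_appearance_behavior_value, total_values
-- ===== SOURCE B (Python) =====
-- def eye_behavior(list_of_eyes):
--     counts = [(k, list_of_eyes.count(k)) for k in ('Friendly', 'Relaxed', 'aggressive')]
--     best_key, best_val = counts[0]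
--     for k, v in counts[1:]:
--         if best_val <= v:
--             best_key, best_val = k, v
--     total = sum(v for _, v in counts)
--     return best_key, best_val, total
-- ===== Notes on version B (the rewrite author's own statement) =====
-- stated objective: simpler
-- what changed: B drops the {0,...} dict and the stable sort entirely: it counts the three recognized labels with list.count and picks the winner with one last-wins argmax fold over the fixed category order (ties go to the later category, matching A's stable sort + [-1]).
import Mathlib
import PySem

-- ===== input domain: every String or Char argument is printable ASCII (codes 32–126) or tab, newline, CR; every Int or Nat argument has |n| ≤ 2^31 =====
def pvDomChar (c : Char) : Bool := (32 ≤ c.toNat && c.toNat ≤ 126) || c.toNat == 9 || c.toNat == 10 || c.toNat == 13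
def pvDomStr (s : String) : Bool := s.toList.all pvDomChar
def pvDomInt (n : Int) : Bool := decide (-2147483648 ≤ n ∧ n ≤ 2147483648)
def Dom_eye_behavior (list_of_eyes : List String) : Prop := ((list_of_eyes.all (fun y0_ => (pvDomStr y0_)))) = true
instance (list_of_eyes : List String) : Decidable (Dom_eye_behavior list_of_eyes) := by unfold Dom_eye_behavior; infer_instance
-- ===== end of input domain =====

-- B replaces A's dict-building loop + stable sort with three list.count passes and a single
-- last-wins argmax fold over the fixed category order (objective: simpler; no speed claim).


-- ===== PORT A =====
-- Python's dict has the heterogeneous phantom key 0 (int); it is represented as the string "0"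
-- here: the key itself is only ever compared with the other (distinct string) keys, the value
-- stays 0, and the sort compares values only, so the result is unaffected.
def eyeStepA (d : PySem.Dict String Int) (area : String) : PySem.Dict String Int :=
  if area = "Friendly" then d.modify "Friendly" 0 (· + 1)
  else if area = "Relaxed" then d.modify "Relaxed" 0 (· + 1)
  else if area = "aggressive" then d.modify "aggressive" 0 (· + 1)
  else d

def eye_behavior (list_of_eyes : List String) : String × Int × Int :=
  let d0 : PySem.Dict String Int :=
    PySem.Dict.ofList [("0", 0), ("Friendly", 0), ("Relaxed", 0), ("aggressive", 0)]
  let d := list_of_eyes.foldl eyeStepA d0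
  let sorted_appearance_behavior := PySem.List.sorted d.items (fun x => x.2) false
  -- sorted_appearance_behavior[-1]: the list always has 4 elements, so the default is never used
  let last := PySem.List.pyGetD sorted_appearance_behavior (-1) ("", 0)
  (last.1, last.2, d.values.sum)

-- ===== PORT B =====
def eye_behavior_alt (list_of_eyes : List String) : String × Int × Int :=
  let counts : List (String × Int) :=
    ["Friendly", "Relaxed", "aggressive"].map (fun k => (k, (list_of_eyes.count k : Int)))
  let best := (counts.drop 1).foldl
    (fun b kv => if b.2 ≤ kv.2 then kv else b) (PySem.List.pyGetD counts 0 ("", 0))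
  (best.1, best.2, (counts.map (·.2)).sum)

-- ===== PRECONDITION & SPEC =====
def Spec_eye_behavior (list_of_eyes : List String) (out : String × Int × Int) : Prop := out = eye_behavior_alt list_of_eyes
instance (list_of_eyes : List String) (out : String × Int × Int) : Decidable (Spec_eye_behavior list_of_eyes out) := by unfold Spec_eye_behavior; infer_instance

-- ===== CLAIM (what is proved, stated in full; the proofs are below) =====
def Claim_equal_eye_behavior : Prop := ∀ (list_of_eyes : List String), Dom_eye_behavior list_of_eyes → Spec_eye_behavior list_of_eyes (eye_behavior list_of_eyes)

-- ===== LEMMAS AND PROOFS =====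

-- one step of A's loop on the invariant dict shape
theorem eyeStepA_items (f r a : Int) (x : String) :
    (eyeStepA (PySem.Dict.mk [("0", 0), ("Friendly", f), ("Relaxed", r), ("aggressive", a)]) x)
    = PySem.Dict.mk [("0", 0), ("Friendly", f + if x = "Friendly" then 1 else 0),
        ("Relaxed", r + if x = "Relaxed" then 1 else 0),
        ("aggressive", a + if x = "aggressive" then 1 else 0)] := by
  unfold eyeStepA
  split_ifs <;> simp_all <;> rfl

-- A's counting loop, fully characterised
theorem eye_loop_items (l : List String) (f r a : Int) :
    l.foldl eyeStepA (PySem.Dict.mk [("0", 0), ("Friendly", f), ("Relaxed", r), ("aggressive", a)])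
    = PySem.Dict.mk [("0", 0), ("Friendly", f + l.count "Friendly"),
        ("Relaxed", r + l.count "Relaxed"), ("aggressive", a + l.count "aggressive")] := by
  induction l generalizing f r a with
  | nil => simp
  | cons x t ih =>
    rw [List.foldl_cons, eyeStepA_items, ih]
    simp only [List.count_cons]
    split_ifs <;> simp_all <;> omega

-- the last element of the stable value-sort equals B's last-wins argmax fold
theorem sorted_last_eq_argmax (f r a : Int) (hf : 0 ≤ f) (hr : 0 ≤ r) (ha : 0 ≤ a) :
    (PySem.List.pyGetD (PySem.List.sorted
        [("0", (0 : Int)), ("Friendly", f), ("Relaxed", r), ("aggressive", a)] (fun x => x.2) false)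
        (-1) ("", 0))
    = ([("Relaxed", r), ("aggressive", a)].foldl
        (fun b kv => if b.2 ≤ kv.2 then kv else b) ("Friendly", f)) := by
  rw [PySem.List.sorted_eq_foldl_insertBy]
  simp only [List.foldl, PySem.List.insertBy]
  split_ifs <;> try simp only [PySem.List.insertBy]
  all_goals (try split_ifs) <;> try simp only [PySem.List.insertBy]
  all_goals (try split_ifs) <;> try simp only [PySem.List.insertBy]
  all_goals simp_all [PySem.List.pyGetD, PySem.List.pyGet?, PySem.List.pyIdx?]
  all_goals omega

-- ===== VERDICT (by name: the statement is the Claim_ definition above) =====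
theorem eye_behavior_spec : Claim_equal_eye_behavior := by
  intro l _
  simp only [Spec_eye_behavior, eye_behavior, eye_behavior_alt]
  have hd0 : PySem.Dict.ofList [("0", (0 : Int)), ("Friendly", 0), ("Relaxed", 0), ("aggressive", 0)]
      = PySem.Dict.mk [("0", 0), ("Friendly", 0), ("Relaxed", 0), ("aggressive", 0)] := by rfl
  rw [hd0, eye_loop_items]
  simp only [PySem.Dict.values_mk, List.map, List.count, zero_add]
  rw [sorted_last_eq_argmax _ _ _ (by positivity) (by positivity) (by positivity)]
  simp [PySem.List.pyGetD, PySem.List.pyGet?, PySem.List.pyIdx?]
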